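-- pv_equiv track=rewrite | github.com/jane-doe006/Py-worksheet1-2-3 | ws3.py | is_goal_reached
-- ===== SOURCE A (Python) =====
-- def is_goal_reached(path):
--     x = 0
--     y = 0
--     for move in path:
--         if move == "up":
--             y += 1
--         elif move == "down":
--             y -= 1
--         elif move == "left":
--             x -= 1
--         elif move == "right":
--             x += 1
--     return (x,y) == (2,0)
-- ===== SOURCE B (Python) =====
-- def is_goal_reached(path):
--     moves = list(path)
--     return moves.count("right") - moves.count("left") == 2 and moves.count("up") == moves.count("down")
-- ===== Notes on version B (the rewrite author's own statement) =====
-- stated objective: idiomatic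
-- what changed: Replaces the per-element branch loop accumulating (x, y) with bulk list.count scans and a direct arithmetic comparison of the counts.
import Mathlib
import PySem

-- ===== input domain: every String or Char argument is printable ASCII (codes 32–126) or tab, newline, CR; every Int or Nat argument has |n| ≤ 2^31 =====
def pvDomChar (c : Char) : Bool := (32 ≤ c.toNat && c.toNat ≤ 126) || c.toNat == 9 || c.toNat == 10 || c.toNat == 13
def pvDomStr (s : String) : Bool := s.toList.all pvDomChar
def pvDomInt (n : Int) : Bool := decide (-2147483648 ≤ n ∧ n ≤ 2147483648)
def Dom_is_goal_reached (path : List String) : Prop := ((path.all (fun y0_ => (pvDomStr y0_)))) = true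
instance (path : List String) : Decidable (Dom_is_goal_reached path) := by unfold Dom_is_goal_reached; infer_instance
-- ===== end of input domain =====

-- B replaces the per-element branch loop accumulating (x, y) with bulk count scans (idiomatic).

-- ===== PORT A =====
def is_goal_reached (path : List String) : Bool :=
  let s : Int × Int := path.foldl (fun (p : Int × Int) move =>
    if move == "up" then (p.1, p.2 + 1)
    else if move == "down" then (p.1, p.2 - 1)
    else if move == "left" then (p.1 - 1, p.2)
    else if move == "right" then (p.1 + 1, p.2)
    else p) (0, 0)
  decide (s = (2, 0))

-- ===== PORT B =====
def is_goal_reached_alt (path : List String) : Bool :=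
  let moves := path
  decide ((PySem.List.count moves "right" : Int) - (PySem.List.count moves "left" : Int) = 2
    ∧ (PySem.List.count moves "up" : Int) = (PySem.List.count moves "down" : Int))

-- ===== PRECONDITION & SPEC =====
def Spec_is_goal_reached (path : List String) (out : Bool) : Prop := out = is_goal_reached_alt path
instance (path : List String) (out : Bool) : Decidable (Spec_is_goal_reached path out) := by unfold Spec_is_goal_reached; infer_instance

-- ===== CLAIM (what is proved, stated in full; the proofs are below) =====
def Claim_equal_is_goal_reached : Prop := ∀ (path : List String), Dom_is_goal_reached path → Spec_is_goal_reached path (is_goal_reached path)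

-- ===== LEMMAS AND PROOFS =====
theorem is_goal_reached_fold_eq (path : List String) (x y : Int) :
    path.foldl (fun (p : Int × Int) move =>
      if move == "up" then (p.1, p.2 + 1)
      else if move == "down" then (p.1, p.2 - 1)
      else if move == "left" then (p.1 - 1, p.2)
      else if move == "right" then (p.1 + 1, p.2)
      else p) (x, y)
    = (x + (path.count "right" : Int) - (path.count "left" : Int),
       y + (path.count "up" : Int) - (path.count "down" : Int)) := by
  induction path generalizing x y with
  | nil => simp
  | cons m t ih =>
    simp only [List.foldl_cons, List.count_cons]
    by_cases h1 : m = "up" <;> by_cases h2 : m = "down" <;> by_cases h3 : m = "left" <;>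
      by_cases h4 : m = "right" <;>
      simp_all <;> ring_nf

-- ===== VERDICT (by name: the statement is the Claim_ definition above) =====
theorem is_goal_reached_spec : Claim_equal_is_goal_reached := by
  intro path _
  unfold Spec_is_goal_reached is_goal_reached is_goal_reached_alt
  simp only [is_goal_reached_fold_eq, PySem.List.count_eq]
  simp [Prod.ext_iff]
  congr 1
  simp only [decide_eq_decide]
  omega
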